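-- pv_equiv track=rewrite | github.com/ExtropyIO/Phishnet | threat_detection/models/url_analyzer.py | calculate_verdict
-- ===== SOURCE A (Python) =====
-- def calculate_verdict(alerts):
--     severity_levels = {"low": 1, "medium": 2, "high": 3, "critical": 4}
--     max_sev = 0
--     for alert in alerts:
--         sev = severity_levels.get(alert["severity"].lower(), 1)
--         if sev > max_sev:
--             max_sev = sev
--
--     severity_map = {1: "low", 2: "medium", 3: "high", 4: "critical"}
--     final_severity = severity_map.get(max_sev, "low")
--
--     verdict = "safe" if max_sev <= 1 else "unsafe"
--     return {"verdict": verdict, "severity": final_severity}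
-- ===== SOURCE B (Python) =====
-- def calculate_verdict(alerts):
--     present = {a["severity"].lower() for a in alerts}
--     if "critical" in present:
--         severity = "critical"
--     elif "high" in present:
--         severity = "high"
--     elif "medium" in present:
--         severity = "medium"
--     else:
--         severity = "low"
--     verdict = "safe" if severity == "low" else "unsafe"
--     return {"verdict": verdict, "severity": severity}
-- ===== Notes on version B (the rewrite author's own statement) =====
-- stated objective: simpler
-- what changed: Replaces the numeric severity-level dicts and running-max loop with a one-pass set of lowercased severity strings followed by ordered membership checks (critical/high/medium, else low).
import Mathlib
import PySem

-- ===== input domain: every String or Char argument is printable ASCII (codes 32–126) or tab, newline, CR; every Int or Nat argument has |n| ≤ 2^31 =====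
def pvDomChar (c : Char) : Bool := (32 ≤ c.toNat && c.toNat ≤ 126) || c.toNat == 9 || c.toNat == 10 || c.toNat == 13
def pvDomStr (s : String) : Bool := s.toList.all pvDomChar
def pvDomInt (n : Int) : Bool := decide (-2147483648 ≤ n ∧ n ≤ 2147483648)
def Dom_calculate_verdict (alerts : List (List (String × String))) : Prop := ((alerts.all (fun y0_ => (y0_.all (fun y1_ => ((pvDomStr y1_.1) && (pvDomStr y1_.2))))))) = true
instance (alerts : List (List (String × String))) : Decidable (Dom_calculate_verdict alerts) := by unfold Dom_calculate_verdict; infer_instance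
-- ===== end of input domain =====

-- B replaces A's numeric severity dicts and running-max loop by a set of lowercased
-- severity strings and ordered membership checks; objective: simpler.


-- ===== PORT A =====
def calculate_verdict (alerts : List (List (String × String))) : List (String × String) :=
  let severity_levels : PySem.Dict String Int :=
    PySem.Dict.mk [("low", 1), ("medium", 2), ("high", 3), ("critical", 4)]
  let max_sev : Int := alerts.foldl (fun max_sev alert =>
    let sev := severity_levels.getD
      (PySem.Str.lower (((PySem.Dict.mk alert).get? "severity").getD "")) 1
    if max_sev < sev then sev else max_sev) 0
  let severity_map : PySem.Dict Int String :=
    PySem.Dict.mk [(1, "low"), (2, "medium"), (3, "high"), (4, "critical")]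
  let final_severity := severity_map.getD max_sev "low"
  let verdict := if max_sev ≤ 1 then "safe" else "unsafe"
  [("verdict", verdict), ("severity", final_severity)]

-- ===== PORT B =====
def calculate_verdict_alt (alerts : List (List (String × String))) : List (String × String) :=
  let present : PySem.Set String :=
    PySem.Set.ofList (alerts.map (fun a =>
      PySem.Str.lower (((PySem.Dict.mk a).get? "severity").getD "")))
  let severity :=
    if present.contains "critical" then "critical"
    else if present.contains "high" then "high"
    else if present.contains "medium" then "medium"
    else "low"
  let verdict := if severity == "low" then "safe" else "unsafe"
  [("verdict", verdict), ("severity", severity)]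

-- ===== PRECONDITION & SPEC =====
-- Pre_ excludes exactly the alert dicts without a "severity" key, where A raises KeyError.
def Pre_calculate_verdict (alerts : List (List (String × String))) : Prop :=
  (alerts.all (fun a => (PySem.Dict.mk a).contains "severity")) = true
instance (alerts : List (List (String × String))) : Decidable (Pre_calculate_verdict alerts) := by
  unfold Pre_calculate_verdict; infer_instance
def pvWitness_calculate_verdict : (List (List (String × String))) :=
  [[("severity", "HIGH")], [("severity", "weird"), ("x", "y")]]
def Spec_calculate_verdict (alerts : List (List (String × String))) (out : List (String × String)) : Prop := out = calculate_verdict_alt alerts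
instance (alerts : List (List (String × String))) (out : List (String × String)) : Decidable (Spec_calculate_verdict alerts out) := by unfold Spec_calculate_verdict; infer_instance

-- ===== CLAIM (what is proved, stated in full; the proofs are below) =====
def Claim_equal_calculate_verdict : Prop := ∀ (alerts : List (List (String × String))), Dom_calculate_verdict alerts → Pre_calculate_verdict alerts → Spec_calculate_verdict alerts (calculate_verdict alerts)

-- ===== LEMMAS AND PROOFS =====

-- the lowercased severity string of one alert
def pvG (a : List (String × String)) : String :=
  PySem.Str.lower (((PySem.Dict.mk a).get? "severity").getD "")

-- A's numeric level of one lowercased severity string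
def pvF (s : String) : Int :=
  (PySem.Dict.mk [("low", (1:Int)), ("medium", 2), ("high", 3), ("critical", 4)]).getD s 1

-- highest level present in a list of lowercased severity strings (1 when none of the named ones is)
def pvN (L : List String) : Int :=
  if "critical" ∈ L then 4 else if "high" ∈ L then 3 else if "medium" ∈ L then 2 else 1

-- the common canonical result both ports are reduced to
def pvOut (L : List String) : List (String × String) :=
  if "critical" ∈ L then [("verdict", "unsafe"), ("severity", "critical")]
  else if "high" ∈ L then [("verdict", "unsafe"), ("severity", "high")]
  else if "medium" ∈ L then [("verdict", "unsafe"), ("severity", "medium")]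
  else [("verdict", "safe"), ("severity", "low")]

lemma pvF_eq (s : String) :
    pvF s = if s = "low" then 1 else if s = "medium" then 2 else if s = "high" then 3
            else if s = "critical" then 4 else 1 := by
  simp only [pvF, PySem.Dict.getD, PySem.Dict.get?, List.find?]
  by_cases h1 : s = "low" <;> by_cases h2 : s = "medium" <;> by_cases h3 : s = "high" <;>
    by_cases h4 : s = "critical" <;>
  · first
    | (subst_vars; rfl)
    | (have e1 : ("low" == s) = false := beq_eq_false_iff_ne.mpr (fun h => h1 h.symm)
       have e2 : ("medium" == s) = false := beq_eq_false_iff_ne.mpr (fun h => h2 h.symm)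
       have e3 : ("high" == s) = false := beq_eq_false_iff_ne.mpr (fun h => h3 h.symm)
       have e4 : ("critical" == s) = false := beq_eq_false_iff_ne.mpr (fun h => h4 h.symm)
       simp [e1, e2, e3, e4, h1, h2, h3, h4])

lemma pvF_bounds (s : String) : 1 ≤ pvF s ∧ pvF s ≤ 4 := by
  rw [pvF_eq]; split_ifs <;> omega

lemma pvN_bounds (L : List String) : 1 ≤ pvN L ∧ pvN L ≤ 4 := by
  unfold pvN; split_ifs <;> omega

lemma pvN_cons (s : String) (L : List String) : max (pvF s) (pvN L) = pvN (s :: L) := by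
  have hb := pvN_bounds L
  rw [pvF_eq]
  unfold pvN
  by_cases h1 : s = "critical" <;> by_cases h2 : s = "high" <;>
    by_cases h3 : s = "medium" <;> by_cases h4 : s = "low" <;>
    simp_all [List.mem_cons] <;>
    split_ifs <;> simp_all

lemma loop_eq_max (alerts : List (List (String × String))) :
    ∀ acc : Int, 1 ≤ acc →
      alerts.foldl (fun m a => if m < pvF (pvG a) then pvF (pvG a) else m) acc
        = max acc (pvN (alerts.map pvG)) := by
  induction alerts with
  | nil =>
    intro acc h
    simp [pvN, h]
  | cons a rest ih =>
    intro acc h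
    have hfa := pvF_bounds (pvG a)
    have step : (if acc < pvF (pvG a) then pvF (pvG a) else acc) = max acc (pvF (pvG a)) := by
      omega
    simp only [List.foldl_cons, step]
    rw [ih (max acc (pvF (pvG a))) (by omega)]
    rw [max_assoc, pvN_cons]
    rfl

lemma loop_eq_of_cons (a : List (String × String)) (rest : List (List (String × String))) :
    (a :: rest).foldl (fun m al =>
        let sev := (PySem.Dict.mk [("low", (1:Int)), ("medium", 2), ("high", 3),
          ("critical", 4)]).getD
            (PySem.Str.lower (((PySem.Dict.mk al).get? "severity").getD "")) 1
        if m < sev then sev else m) 0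
      = pvN ((a :: rest).map pvG) := by
  show (a :: rest).foldl (fun m al => if m < pvF (pvG al) then pvF (pvG al) else m) 0
      = pvN ((a :: rest).map pvG)
  have hfa := pvF_bounds (pvG a)
  have step : ((0:Int) < pvF (pvG a)) = True := by simp; omega
  simp only [List.foldl_cons, step, if_true]
  rw [loop_eq_max rest (pvF (pvG a)) (by omega), pvN_cons]
  rfl

lemma A_eq (alerts : List (List (String × String))) :
    calculate_verdict alerts = pvOut (alerts.map pvG) := by
  cases alerts with
  | nil => decide
  | cons a rest =>
    simp only [calculate_verdict]
    rw [loop_eq_of_cons a rest]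
    have hN := pvN_bounds ((a :: rest).map pvG)
    unfold pvN pvOut
    by_cases hc : "critical" ∈ (a :: rest).map pvG <;>
      by_cases hh : "high" ∈ (a :: rest).map pvG <;>
        by_cases hm : "medium" ∈ (a :: rest).map pvG <;>
          simp only [hc, hh, hm, if_true, if_false] <;> decide

lemma B_eq (alerts : List (List (String × String))) :
    calculate_verdict_alt alerts = pvOut (alerts.map pvG) := by
  simp only [calculate_verdict_alt]
  have hmap : alerts.map (fun a =>
      PySem.Str.lower (((PySem.Dict.mk a).get? "severity").getD "")) = alerts.map pvG := rfl
  rw [hmap]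
  unfold pvOut
  by_cases hc : "critical" ∈ alerts.map pvG <;>
    by_cases hh : "high" ∈ alerts.map pvG <;>
      by_cases hm : "medium" ∈ alerts.map pvG <;>
        simp [PySem.Set.mem_ofList, hc, hh, hm]

theorem calculate_verdict_spec : Claim_equal_calculate_verdict := by
  intro alerts _ _
  unfold Spec_calculate_verdict
  rw [A_eq, B_eq]
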